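-- pv_equiv track=rewrite | github.com/trducng/god | god/records/storage.py | get_matching_child
-- ===== SOURCE A (Python) =====
-- from typing import Dict, List
--
-- def get_matching_child(
--     key: str, child_nodes: List, start: int = None, end: int = None
-- ) -> str:
--     """Locate child node that contain keys
--
--     This algorithm compare between `key` and `child_nodes[][2]` (stop boundary)
--
--     Args:
--         key: the key to search
--         child_nodes: each item contains hash, start boundary and stop boundary
--         start: the start index to search in `child_nodes`
--         end: the end index to search in `child_nodes`
--
--     Returns:
--         the hash of child node
--     """
--     start = 0 if start is None else start
--     end = len(child_nodes) - 1 if end is None else end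
--
--     if child_nodes[start][2] >= key:
--         return child_nodes[start][0]
--
--     if child_nodes[end][2] <= key:
--         return child_nodes[end][0]
--
--     if start + 1 == end:
--         return child_nodes[end][0]
--
--     middle = (start + end) // 2
--     if child_nodes[middle][2] > key:
--         return get_matching_child(key, child_nodes, start, middle)
--     else:
--         return get_matching_child(key, child_nodes, middle, end)
-- ===== SOURCE B (Python) =====
-- def get_matching_child(key, child_nodes, start=None, end=None):
--     lo = 0 if start is None else start
--     hi = len(child_nodes) - 1 if end is None else end
--     if child_nodes[lo][2] >= key:
--         return child_nodes[lo][0]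
--     if child_nodes[hi][2] <= key:
--         return child_nodes[hi][0]
--     # loop invariant: child_nodes[lo][2] < key < child_nodes[hi][2]
--     while lo + 1 != hi:
--         mid = (lo + hi) // 2
--         stop = child_nodes[mid][2]
--         if stop == key:
--             return child_nodes[mid][0]
--         if stop > key:
--             hi = mid
--         else:
--             lo = mid
--     return child_nodes[hi][0]
-- ===== Notes on version B (the rewrite author's own statement) =====
-- stated objective: alternative
-- what changed: Recursive binary search that re-checks both window boundaries on every call is replaced by an iterative search that checks the boundaries once, then loops on the window maintaining the invariant stop[lo] < key < stop[hi], returning early on an exact stop match.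
-- outside the precondition, e.g. on get_matching_child('b', [('h0', '', 'c'), ('h1', '', 'b'), ('h2', '', 'a')], 2, 0): A returns 'h1', B returns 'h1'
import Mathlib
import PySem

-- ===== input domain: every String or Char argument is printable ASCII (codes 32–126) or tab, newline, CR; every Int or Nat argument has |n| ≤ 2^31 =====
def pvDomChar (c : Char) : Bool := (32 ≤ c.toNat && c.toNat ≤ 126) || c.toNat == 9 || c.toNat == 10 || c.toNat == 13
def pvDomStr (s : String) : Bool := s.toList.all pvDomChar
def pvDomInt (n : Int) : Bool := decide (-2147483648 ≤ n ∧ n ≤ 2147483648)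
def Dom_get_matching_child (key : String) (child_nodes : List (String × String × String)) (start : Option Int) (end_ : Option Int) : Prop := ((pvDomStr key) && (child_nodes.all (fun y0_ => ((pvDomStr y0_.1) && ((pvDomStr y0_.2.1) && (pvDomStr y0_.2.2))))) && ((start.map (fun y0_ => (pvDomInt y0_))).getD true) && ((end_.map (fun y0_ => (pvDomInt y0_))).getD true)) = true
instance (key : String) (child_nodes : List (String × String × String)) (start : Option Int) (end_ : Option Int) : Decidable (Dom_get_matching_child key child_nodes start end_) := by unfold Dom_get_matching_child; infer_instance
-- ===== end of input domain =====

-- B replaces A's recursion (which re-checks both window boundaries at every level) by an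
-- iterative binary search that checks the boundaries once and then loops under the invariant
-- stop[lo] < key < stop[hi]; same result on Pre_, no speed claim.


-- ===== PORT A =====
-- Recursive helper of A; fuel only makes the recursion total (inside Pre_ the initial fuel
-- (e-s).toNat + 1 always suffices, so the "" defaults are never reached there).
def getMatchA (key : String) (cn : List (String × String × String)) (s e : Int) : Nat → String
  | 0 => ""
  | fuel + 1 =>
    match PySem.List.pyGet? cn s with
    | none => ""                                   -- IndexError (excluded by Pre_)
    | some cs =>
      if key ≤ cs.2.2 then cs.1                    -- child_nodes[start][2] >= key
      else
        match PySem.List.pyGet? cn e with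
        | none => ""                               -- IndexError (excluded by Pre_)
        | some ce =>
          if ce.2.2 ≤ key then ce.1                -- child_nodes[end][2] <= key
          else if s + 1 = e then ce.1
          else
            let middle := PySem.Int.floordiv (s + e) 2
            match PySem.List.pyGet? cn middle with
            | some cm =>
              if key < cm.2.2 then getMatchA key cn s middle fuel   -- child_nodes[middle][2] > key
              else getMatchA key cn middle e fuel
            | none => ""                           -- IndexError (excluded by Pre_)

def get_matching_child (key : String) (child_nodes : List (String × String × String)) (start : Option Int) (end_ : Option Int) : String :=
  let s : Int := start.getD 0
  let e : Int := end_.getD ((child_nodes.length : Int) - 1)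
  getMatchA key child_nodes s e ((e - s).toNat + (s - e).toNat + 1)

-- ===== PORT B =====
-- The while loop of Source B; fuel only bounds the loop (inside Pre_ the initial fuel suffices).
def getMatchBLoop (key : String) (cn : List (String × String × String)) : Nat → Int → Int → String
  | fuel, lo, hi =>
    if lo + 1 = hi then
      match PySem.List.pyGet? cn hi with           -- return child_nodes[hi][0]
      | some ch => ch.1
      | none => ""
    else
      match fuel with
      | 0 => ""
      | fuel + 1 =>
        let mid := PySem.Int.floordiv (lo + hi) 2
        match PySem.List.pyGet? cn mid with        -- stop = child_nodes[mid][2]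
        | some cm =>
          if cm.2.2 = key then cm.1
          else if key < cm.2.2 then getMatchBLoop key cn fuel lo mid
          else getMatchBLoop key cn fuel mid hi
        | none => ""

def get_matching_child_alt (key : String) (child_nodes : List (String × String × String)) (start : Option Int) (end_ : Option Int) : String :=
  let lo : Int := start.getD 0
  let hi : Int := end_.getD ((child_nodes.length : Int) - 1)
  match PySem.List.pyGet? child_nodes lo with
  | none => ""
  | some cl =>
    if key ≤ cl.2.2 then cl.1
    else
      match PySem.List.pyGet? child_nodes hi with
      | none => ""
      | some ch =>
        if ch.2.2 ≤ key then ch.1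
        else getMatchBLoop key child_nodes ((hi - lo).toNat + (lo - hi).toNat + 1) lo hi

-- ===== PRECONDITION & SPEC =====
-- Pre_ excludes inputs where A raises IndexError (an index it actually reaches lying
-- outside [-len, len-1]) and reversed windows (start > end) that are not settled by A's
-- first two boundary checks, on which A's recursion can fail to terminate; where A does
-- return on such a reversed window B returns the same value (see cites).
def Pre_get_matching_child (key : String) (child_nodes : List (String × String × String)) (start : Option Int) (end_ : Option Int) : Prop :=
  -(child_nodes.length : Int) ≤ start.getD 0 ∧
  start.getD 0 < (child_nodes.length : Int) ∧
  ((-(child_nodes.length : Int) ≤ end_.getD ((child_nodes.length : Int) - 1) ∧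
    end_.getD ((child_nodes.length : Int) - 1) < (child_nodes.length : Int) ∧
    (start.getD 0 ≤ end_.getD ((child_nodes.length : Int) - 1) ∨
     (PySem.List.pyGet? child_nodes (end_.getD ((child_nodes.length : Int) - 1))).any
       (fun c => decide (c.2.2 ≤ key)) = true)) ∨
   (PySem.List.pyGet? child_nodes (start.getD 0)).any (fun c => decide (key ≤ c.2.2)) = true)
instance (key : String) (child_nodes : List (String × String × String)) (start : Option Int) (end_ : Option Int) : Decidable (Pre_get_matching_child key child_nodes start end_) := by unfold Pre_get_matching_child; infer_instance

def pvWitness_get_matching_child : String × (List (String × String × String)) × Option Int × Option Int :=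
  ("b", [("h1", "a", "a"), ("h2", "b", "c")], none, none)

def Spec_get_matching_child (key : String) (child_nodes : List (String × String × String)) (start : Option Int) (end_ : Option Int) (out : String) : Prop := out = get_matching_child_alt key child_nodes start end_
instance (key : String) (child_nodes : List (String × String × String)) (start : Option Int) (end_ : Option Int) (out : String) : Decidable (Spec_get_matching_child key child_nodes start end_ out) := by unfold Spec_get_matching_child; infer_instance

-- ===== CLAIM (what is proved, stated in full; the proofs are below) =====
def Claim_equal_get_matching_child : Prop := ∀ (key : String) (child_nodes : List (String × String × String)) (start : Option Int) (end_ : Option Int), Dom_get_matching_child key child_nodes start end_ → Pre_get_matching_child key child_nodes start end_ → Spec_get_matching_child key child_nodes start end_ (get_matching_child key child_nodes start end_)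

-- ===== LEMMAS AND PROOFS =====

theorem pyGet?_isSome_of_bounds {α : Type} (xs : List α) (i : Int)
    (h1 : -(xs.length : Int) ≤ i) (h2 : i < (xs.length : Int)) :
    ∃ c, PySem.List.pyGet? xs i = some c := by
  rcases h : PySem.List.pyGet? xs i with _ | c
  · rw [PySem.List.pyGet?_eq_none_iff] at h
    exact absurd ⟨h1, h2⟩ h
  · exact ⟨c, rfl⟩

theorem getMatchA_succ (key : String) (cn : List (String × String × String)) (s e : Int)
    (fuel : Nat) (cs ce cm : String × String × String)
    (hcs : PySem.List.pyGet? cn s = some cs) (hce : PySem.List.pyGet? cn e = some ce)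
    (hcm : PySem.List.pyGet? cn (PySem.Int.floordiv (s + e) 2) = some cm) :
    getMatchA key cn s e (fuel + 1) =
      (if key ≤ cs.2.2 then cs.1
       else if ce.2.2 ≤ key then ce.1
       else if s + 1 = e then ce.1
       else if key < cm.2.2 then getMatchA key cn s (PySem.Int.floordiv (s + e) 2) fuel
       else getMatchA key cn (PySem.Int.floordiv (s + e) 2) e fuel) := by
  conv_lhs => rw [getMatchA]
  rw [hcs]
  simp only [hce, hcm]

theorem getMatchBLoop_exit (key : String) (cn : List (String × String × String))
    (fuel : Nat) (lo hi : Int) (ch : String × String × String)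
    (hnext : lo + 1 = hi) (hch : PySem.List.pyGet? cn hi = some ch) :
    getMatchBLoop key cn fuel lo hi = ch.1 := by
  rcases fuel with _ | fuel <;>
    · conv_lhs => rw [getMatchBLoop]
      rw [if_pos hnext]
      simp only [hch]

theorem getMatchBLoop_step (key : String) (cn : List (String × String × String))
    (fuel : Nat) (lo hi : Int) (cm : String × String × String)
    (hnext : lo + 1 ≠ hi)
    (hcm : PySem.List.pyGet? cn (PySem.Int.floordiv (lo + hi) 2) = some cm) :
    getMatchBLoop key cn (fuel + 1) lo hi =
      (if cm.2.2 = key then cm.1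
       else if key < cm.2.2 then getMatchBLoop key cn fuel lo (PySem.Int.floordiv (lo + hi) 2)
       else getMatchBLoop key cn fuel (PySem.Int.floordiv (lo + hi) 2) hi) := by
  conv_lhs => rw [getMatchBLoop]
  rw [if_neg hnext]
  simp only [hcm]

-- Core invariant lemma: with stop[s] < key < stop[e] and s < e, A's recursion with any
-- sufficient fuel equals B's loop with any sufficient fuel.
theorem getMatch_eq (key : String) (cn : List (String × String × String)) :
    ∀ (fa : Nat) (s e : Int) (fb : Nat)
      (hs : -(cn.length : Int) ≤ s) (hse : s < e) (he : e < (cn.length : Int))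
      (cs ce : String × String × String)
      (hcs : PySem.List.pyGet? cn s = some cs) (hce : PySem.List.pyGet? cn e = some ce)
      (hls : cs.2.2 < key) (hle : key < ce.2.2)
      (hfa : (e - s).toNat ≤ fa) (hfb : (e - s).toNat ≤ fb),
      getMatchA key cn s e fa = getMatchBLoop key cn fb s e := by
  intro fa
  induction fa with
  | zero => intro s e fb hs hse he cs ce hcs hce hls hle hfa hfb; omega
  | succ fa ih =>
    intro s e fb hs hse he cs ce hcs hce hls hle hfa hfb
    have hmlo : s ≤ PySem.Int.floordiv (s + e) 2 :=
      (PySem.Int.floordiv_two_mid_bounds (le_of_lt hse)).1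
    have hmhi : PySem.Int.floordiv (s + e) 2 ≤ e :=
      (PySem.Int.floordiv_two_mid_bounds (le_of_lt hse)).2
    obtain ⟨cm, hcm⟩ := pyGet?_isSome_of_bounds cn (PySem.Int.floordiv (s + e) 2)
      (by omega) (by omega)
    rw [getMatchA_succ key cn s e fa cs ce cm hcs hce hcm,
      if_neg (not_le.mpr hls), if_neg (not_le.mpr hle)]
    by_cases hnext : s + 1 = e
    · rw [if_pos hnext, getMatchBLoop_exit key cn fb s e ce hnext hce]
    · rw [if_neg hnext]
      have hmlo' : s + 1 ≤ PySem.Int.floordiv (s + e) 2 := by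
        rw [PySem.Int.le_floordiv_iff_mul_le (by omega)]; omega
      have hmhi' : PySem.Int.floordiv (s + e) 2 < e := by
        rw [PySem.Int.floordiv_lt_iff_lt_mul (by omega)]; omega
      obtain ⟨fb', rfl⟩ : ∃ fb', fb = fb' + 1 := by
        rcases fb with _ | fb'
        · omega
        · exact ⟨fb', rfl⟩
      rw [getMatchBLoop_step key cn fb' s e cm hnext hcm]
      by_cases hgt : key < cm.2.2
      · rw [if_pos hgt, if_neg (show ¬ cm.2.2 = key from fun h => absurd (h ▸ hgt) (lt_irrefl key)),
          if_pos hgt]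
        exact ih s (PySem.Int.floordiv (s + e) 2) fb' hs (by omega) (by omega)
          cs cm hcs hcm hls hgt (by omega) (by omega)
      · rw [if_neg hgt, if_neg hgt]
        by_cases heq : cm.2.2 = key
        · -- A recurses on (mid, e); the subcall returns cm.1 at its first boundary check.
          rw [if_pos heq]
          obtain ⟨fa', rfl⟩ : ∃ fa', fa = fa' + 1 := by
            rcases fa with _ | fa'
            · omega
            · exact ⟨fa', rfl⟩
          have hmlo2 : PySem.Int.floordiv (s + e) 2 ≤
              PySem.Int.floordiv (PySem.Int.floordiv (s + e) 2 + e) 2 :=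
            (PySem.Int.floordiv_two_mid_bounds (le_of_lt hmhi')).1
          have hmhi2 : PySem.Int.floordiv (PySem.Int.floordiv (s + e) 2 + e) 2 ≤ e :=
            (PySem.Int.floordiv_two_mid_bounds (le_of_lt hmhi')).2
          obtain ⟨cm2, hcm2⟩ := pyGet?_isSome_of_bounds cn
            (PySem.Int.floordiv (PySem.Int.floordiv (s + e) 2 + e) 2) (by omega) (by omega)
          rw [getMatchA_succ key cn _ e fa' cm ce cm2 hcm hce hcm2,
            if_pos (le_of_eq heq.symm)]
        · rw [if_neg heq]
          have hlt : cm.2.2 < key := lt_of_le_of_ne (not_lt.mp hgt) heq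
          exact ih (PySem.Int.floordiv (s + e) 2) e fb' (by omega) (by omega) he
            cm ce hcm hce hlt hle (by omega) (by omega)

-- A's first boundary check fires: one unfolding step of the recursion.
theorem getMatchA_first (key : String) (cn : List (String × String × String)) (s e : Int)
    (fuel : Nat) (cs : String × String × String)
    (hcs : PySem.List.pyGet? cn s = some cs) (h1 : key ≤ cs.2.2) :
    getMatchA key cn s e (fuel + 1) = cs.1 := by
  conv_lhs => rw [getMatchA]
  rw [hcs]
  simp only [if_pos h1]

-- A's second boundary check fires.
theorem getMatchA_second (key : String) (cn : List (String × String × String)) (s e : Int)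
    (fuel : Nat) (cs ce : String × String × String)
    (hcs : PySem.List.pyGet? cn s = some cs) (h1 : ¬ key ≤ cs.2.2)
    (hce : PySem.List.pyGet? cn e = some ce) (h2 : ce.2.2 ≤ key) :
    getMatchA key cn s e (fuel + 1) = ce.1 := by
  conv_lhs => rw [getMatchA]
  rw [hcs]
  simp only [hce, if_neg h1, if_pos h2]

-- ===== VERDICT (by name: the statement is the Claim_ definition above) =====
theorem get_matching_child_spec : Claim_equal_get_matching_child := by
  intro key cn start end_ _hdom hpre
  obtain ⟨hs, hsn, hrest⟩ := hpre
  unfold Spec_get_matching_child get_matching_child get_matching_child_alt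
  obtain ⟨cs, hcs⟩ := pyGet?_isSome_of_bounds cn (start.getD 0) hs hsn
  simp only [hcs]
  by_cases h1 : key ≤ cs.2.2
  · rw [getMatchA_first key cn _ _ _ cs hcs h1, if_pos h1]
  · have hrest' : -(cn.length : Int) ≤ end_.getD ((cn.length : Int) - 1) ∧
        end_.getD ((cn.length : Int) - 1) < (cn.length : Int) ∧
        (start.getD 0 ≤ end_.getD ((cn.length : Int) - 1) ∨
         (PySem.List.pyGet? cn (end_.getD ((cn.length : Int) - 1))).any
           (fun c => decide (c.2.2 ≤ key)) = true) := by
      rcases hrest with h | h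
      · exact h
      · rw [hcs] at h
        simp only [Option.any_some, decide_eq_true_eq] at h
        exact absurd h h1
    obtain ⟨hes, he, hdisj⟩ := hrest'
    obtain ⟨ce, hce⟩ := pyGet?_isSome_of_bounds cn (end_.getD ((cn.length : Int) - 1)) hes he
    simp only [hce]
    by_cases h2 : ce.2.2 ≤ key
    · rw [getMatchA_second key cn _ _ _ cs ce hcs h1 hce h2, if_neg h1, if_pos h2]
    · have hse : start.getD 0 ≤ end_.getD ((cn.length : Int) - 1) := by
        rcases hdisj with h | h
        · exact h
        · rw [hce] at h
          simp only [Option.any_some, decide_eq_true_eq] at h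
          exact absurd h h2
      rw [if_neg h1, if_neg h2]
      have hne : start.getD 0 ≠ end_.getD ((cn.length : Int) - 1) := by
        intro hcontra
        rw [hcontra, hce, Option.some.injEq] at hcs
        have hkey : key < cs.2.2 := hcs ▸ not_le.mp h2
        exact absurd ((not_le.mp h1).trans hkey) (lt_irrefl _)
      exact getMatch_eq key cn
        ((end_.getD ((cn.length : Int) - 1) - start.getD 0).toNat +
          (start.getD 0 - end_.getD ((cn.length : Int) - 1)).toNat + 1)
        (start.getD 0) (end_.getD ((cn.length : Int) - 1))
        ((end_.getD ((cn.length : Int) - 1) - start.getD 0).toNat +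
          (start.getD 0 - end_.getD ((cn.length : Int) - 1)).toNat + 1)
        hs (lt_of_le_of_ne hse hne) he cs ce hcs hce
        (not_le.mp h1) (not_le.mp h2) (by omega) (by omega)
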